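-- pv_equiv track=rewrite | github.com/patrick-llgc/HackerRank | Two_Strings.py | exist_common
-- ===== SOURCE A (Python) =====
-- def exist_common(a, b):
--     set_a = set(list(a))
--     common_flag = 0
--     for char in b:
--         if char in set_a:
--             common_flag = 1
--             break
--     return common_flag
-- ===== SOURCE B (Python) =====
-- def exist_common(a, b):
--     xs = sorted(a)
--     ys = sorted(b)
--     i = 0
--     j = 0
--     while i < len(xs) and j < len(ys):
--         if xs[i] == ys[j]:
--             return 1
--         if xs[i] < ys[j]:
--             i += 1
--         else:
--             j += 1
--     return 0
-- ===== Notes on version B (the rewrite author's own statement) =====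
-- stated objective: alternative
-- what changed: Replaces the hash-set membership scan by sorting both strings and running a two-pointer merge intersection scan with no set at all.
import Mathlib
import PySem

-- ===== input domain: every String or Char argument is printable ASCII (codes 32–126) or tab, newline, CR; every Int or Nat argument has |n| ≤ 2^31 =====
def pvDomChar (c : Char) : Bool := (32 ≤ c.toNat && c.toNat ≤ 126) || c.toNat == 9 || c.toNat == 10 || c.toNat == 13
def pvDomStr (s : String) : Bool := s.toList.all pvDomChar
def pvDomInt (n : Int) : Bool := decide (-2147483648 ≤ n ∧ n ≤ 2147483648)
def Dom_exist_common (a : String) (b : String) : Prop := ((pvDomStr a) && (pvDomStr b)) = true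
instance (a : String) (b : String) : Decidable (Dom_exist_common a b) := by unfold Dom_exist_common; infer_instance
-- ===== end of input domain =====

-- B sorts both strings and finds a common character by a two-pointer merge scan, instead of A's hash-set membership loop (alternative algorithm; return value equivalence proved).


-- ===== PORT A =====
-- 'for char in b: if char in set_a: common_flag = 1; break' — loop with early break
def existCommonLoop (set_a : PySem.Set Char) : List Char → Int
  | [] => 0
  | c :: rest => if PySem.Set.contains set_a c then 1 else existCommonLoop set_a rest

def exist_common (a : String) (b : String) : Int :=
  existCommonLoop (PySem.Set.ofList a.toList) b.toList

-- ===== PORT B =====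
-- the two-pointer while loop over the sorted lists, as structural recursion on the two suffixes
def mergeCommon : List Char → List Char → Int
  | [], _ => 0
  | _ :: _, [] => 0
  | x :: xs, y :: ys =>
    if x = y then 1
    else if x < y then mergeCommon xs (y :: ys)
    else mergeCommon (x :: xs) ys

def exist_common_alt (a : String) (b : String) : Int :=
  mergeCommon (PySem.List.sorted a.toList (fun c => c) false)
              (PySem.List.sorted b.toList (fun c => c) false)

-- ===== PRECONDITION & SPEC =====
def Spec_exist_common (a : String) (b : String) (out : Int) : Prop := out = exist_common_alt a b
instance (a : String) (b : String) (out : Int) : Decidable (Spec_exist_common a b out) := by unfold Spec_exist_common; infer_instance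

-- ===== CLAIM =====
def Claim_equal_exist_common : Prop := ∀ (a : String) (b : String), Dom_exist_common a b → Spec_exist_common a b (exist_common a b)

-- ===== LEMMAS AND PROOFS =====
lemma existCommonLoop_eq (s : PySem.Set Char) (l : List Char) :
    existCommonLoop s l = if ∃ c ∈ l, c ∈ s then 1 else 0 := by
  induction l with
  | nil => simp [existCommonLoop]
  | cons c rest ih =>
    simp only [existCommonLoop, ih]
    by_cases h : c ∈ s
    · simp [h]
    · have hc : PySem.Set.contains s c = false := by
        by_contra hc
        exact h ((PySem.Set.contains_iff _ _).mp (by simpa using hc))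
      simp [h]

lemma mergeCommon_eq (xs ys : List Char) (hx : xs.Pairwise (· ≤ ·)) (hy : ys.Pairwise (· ≤ ·)) :
    mergeCommon xs ys = if ∃ c ∈ xs, c ∈ ys then 1 else 0 := by
  induction xs generalizing ys with
  | nil => simp [mergeCommon]
  | cons x xs ihx =>
    induction hy with
    | nil => simp [mergeCommon]
    | @cons y ys hrel hpw ihy =>
      show mergeCommon (x :: xs) (y :: ys) = _
      by_cases hxy : x = y
      · subst hxy; simp [mergeCommon]
      · by_cases hlt : x < y
        · have hnotin : x ∉ y :: ys := by
            intro h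
            rcases List.mem_cons.mp h with rfl | h
            · exact hxy rfl
            · exact absurd (hrel x h) (not_le.mpr hlt)
          rw [show mergeCommon (x :: xs) (y :: ys) = mergeCommon xs (y :: ys) by
            simp [mergeCommon, hxy, hlt]]
          rw [ihx (y :: ys) hx.of_cons (List.Pairwise.cons hrel hpw)]
          congr 1
          rw [eq_iff_iff]
          constructor
          · rintro ⟨c, h, hc2⟩
            exact ⟨c, List.mem_cons_of_mem _ h, hc2⟩
          · rintro ⟨c, hc1, hc2⟩
            rcases List.mem_cons.mp hc1 with rfl | h
            · exact absurd hc2 hnotin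
            · exact ⟨c, h, hc2⟩
        · have hyx : y < x := lt_of_le_of_ne (not_lt.mp hlt) (Ne.symm hxy)
          have hnotin : y ∉ x :: xs := by
            intro h
            rcases List.mem_cons.mp h with rfl | h
            · exact hxy rfl
            · exact absurd (List.rel_of_pairwise_cons hx h) (not_le.mpr hyx)
          rw [show mergeCommon (x :: xs) (y :: ys) = mergeCommon (x :: xs) ys by
            simp [mergeCommon, hxy, hlt]]
          rw [ihy]
          congr 1
          rw [eq_iff_iff]
          constructor
          · rintro ⟨c, hc1, h⟩
            exact ⟨c, hc1, List.mem_cons_of_mem _ h⟩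
          · rintro ⟨c, hc1, hc2⟩
            rcases List.mem_cons.mp hc2 with rfl | h
            · exact absurd hc1 hnotin
            · exact ⟨c, hc1, h⟩

-- ===== VERDICT =====
theorem exist_common_spec : Claim_equal_exist_common := by
  intro a b _
  unfold Spec_exist_common exist_common exist_common_alt
  rw [existCommonLoop_eq,
      mergeCommon_eq _ _ (PySem.List.sorted_pairwise _ _) (PySem.List.sorted_pairwise _ _)]
  congr 1
  simp only [eq_iff_iff, PySem.List.mem_sorted]
  constructor
  · rintro ⟨c, hb, ha⟩; exact ⟨c, (PySem.Set.mem_ofList _ _).mp ha, hb⟩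
  · rintro ⟨c, ha, hb⟩; exact ⟨c, hb, (PySem.Set.mem_ofList _ _).mpr ha⟩
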